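-- pv_equiv track=rewrite | github.com/newpolaris/algorithm | algospot/meetingroom.py | solve2SAT
-- ===== SOURCE A (Python) =====
-- def solve2SAT(label):
--     n = len(label) // 2
--     for a, b in zip(*[iter(range(2*n))]*2):
--         if label[a] == label[b]:
--             return None
--     value = [-1] * n
--     order = sorted([(-label[i], i) for i in range(2*n)])
--     for i in range(2*n):
--         vertex = order[i][1]
--         variable, isFalse = vertex // 2, vertex % 2
--         if value[variable] != -1:
--             continue
--         value[variable] = isFalse
--     return value
-- ===== SOURCE B (Python) =====
-- def solve2SAT(label):
--     # One linear pass: for each variable the literal with the larger SCC label wins,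
--     # so value[i] = 1 iff label[2*i] < label[2*i+1]; None on a tie.
--     n = len(label) // 2
--     value = []
--     for i in range(n):
--         a, b = label[2 * i], label[2 * i + 1]
--         if a == b:
--             return None
--         value.append(int(a < b))
--     return value
-- ===== Notes on version B (the rewrite author's own statement) =====
-- stated objective: faster
-- what changed: B drops A's sort of all 2n literals by (-label, index) followed by a greedy first-seen pass, and instead decides each variable in one linear pass by directly comparing its two literals' labels (value[i] = 1 iff label[2i] < label[2i+1]).
import Mathlib
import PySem

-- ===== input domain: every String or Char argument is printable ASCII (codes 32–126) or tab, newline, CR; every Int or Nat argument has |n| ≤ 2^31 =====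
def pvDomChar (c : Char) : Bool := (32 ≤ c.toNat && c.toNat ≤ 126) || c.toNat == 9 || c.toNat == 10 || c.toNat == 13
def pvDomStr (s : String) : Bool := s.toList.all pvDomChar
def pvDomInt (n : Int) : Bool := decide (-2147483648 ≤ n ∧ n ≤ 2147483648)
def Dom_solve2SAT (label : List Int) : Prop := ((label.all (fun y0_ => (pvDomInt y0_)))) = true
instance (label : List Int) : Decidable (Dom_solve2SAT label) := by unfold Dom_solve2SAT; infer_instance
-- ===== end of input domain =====

-- B replaces A's O(n log n) sort-then-greedy pass by one linear pass comparing the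
-- two literals' labels per variable (objective: faster).

-- ===== PORT A =====
def solve2SAT (label : List Int) : Option (List Int) :=
  let n : Nat := label.length / 2
  if (List.range n).any (fun k =>
      PySem.List.pyGetD label (2 * (k : Int)) 0 == PySem.List.pyGetD label (2 * (k : Int) + 1) 0) then
    none
  else
    let value : List Int := List.replicate n (-1)
    let order : List (Int × Int) :=
      PySem.List.sorted2
        ((PySem.List.pyRange 0 (2 * (n : Int))).map (fun i => (-(PySem.List.pyGetD label i 0), i)))
        Prod.fst Prod.snd
    some ((PySem.List.pyRange 0 (2 * (n : Int))).foldl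
      (fun value i =>
        let vertex := (PySem.List.pyGetD order i (0, 0)).2
        let var_ := PySem.Int.floordiv vertex 2
        let isFalse := PySem.Int.mod vertex 2
        if PySem.List.pyGetD value var_ 0 ≠ -1 then value
        else PySem.List.pySetD value var_ isFalse)
      value)

-- ===== PORT B =====
def altGo (label : List Int) : List Nat → List Int → Option (List Int)
  | [], acc => some acc
  | k :: rest, acc =>
    let a := PySem.List.pyGetD label (2 * (k : Int)) 0
    let b := PySem.List.pyGetD label (2 * (k : Int) + 1) 0
    if a == b then none
    else altGo label rest (acc ++ [if a < b then 1 else 0])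

def solve2SAT_alt (label : List Int) : Option (List Int) :=
  altGo label (List.range (label.length / 2)) []

-- ===== PRECONDITION & SPEC =====
def Spec_solve2SAT (label : List Int) (out : Option (List Int)) : Prop := out = solve2SAT_alt label
instance (label : List Int) (out : Option (List Int)) : Decidable (Spec_solve2SAT label out) := by unfold Spec_solve2SAT; infer_instance

-- ===== CLAIM (what is proved, stated in full; the proofs are below) =====
def Claim_equal_solve2SAT : Prop := ∀ (label : List Int), Dom_solve2SAT label → Spec_solve2SAT label (solve2SAT label)

-- ===== LEMMAS AND PROOFS =====

-- B's loop, characterised: None iff some variable's two labels tie, else the mapped list.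
theorem altGo_eq (label : List Int) (l : List Nat) (acc : List Int) :
    altGo label l acc =
      (if l.any (fun k =>
          PySem.List.pyGetD label (2 * (k : Int)) 0 == PySem.List.pyGetD label (2 * (k : Int) + 1) 0) then
        none
      else some (acc ++ l.map (fun k : Nat =>
        if PySem.List.pyGetD label (2 * (k : Int)) 0 < PySem.List.pyGetD label (2 * (k : Int) + 1) 0
        then (1 : Int) else 0))) := by
  induction l generalizing acc with
  | nil => simp [altGo]
  | cons k rest ih =>
    by_cases hk : (PySem.List.pyGetD label (2 * (k : Int)) 0 == PySem.List.pyGetD label (2 * (k : Int) + 1) 0) = true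
    · simp [altGo, hk]
    · simp only [altGo, List.any_cons, List.map_cons, hk, Bool.false_or, if_false, ih,
        Bool.false_eq_true]
      split <;> simp

-- the tuple comparator Python's sort uses on our pairs
def pvBf (a b : Int × Int) : Bool :=
  decide (a.1 < b.1) || (!decide (b.1 < a.1) && decide (a.2 < b.2))

theorem pvBf_asymm (a b : Int × Int) (h : pvBf a b = true) : pvBf b a = false := by
  simp [pvBf] at *; omega

theorem pvBf_trans (a b c : Int × Int) (h1 : pvBf a b = true) (h2 : pvBf b c = true) :
    pvBf a c = true := by
  simp [pvBf] at *; omega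

theorem insertBy_pairwise (x : Int × Int) (ys : List (Int × Int))
    (h : ys.Pairwise (fun a b => pvBf b a = false)) :
    (PySem.List.insertBy pvBf x ys).Pairwise (fun a b => pvBf b a = false) := by
  induction ys with
  | nil => simp [PySem.List.insertBy]
  | cons y ys ih =>
    rw [PySem.List.insertBy]
    rcases h with - | ⟨hy, hys⟩
    by_cases hxy : pvBf x y = true
    · rw [if_pos hxy]
      refine List.Pairwise.cons ?_ (List.Pairwise.cons hy hys)
      intro z hz
      rcases List.mem_cons.mp hz with rfl | hz
      · exact pvBf_asymm _ _ hxy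
      · by_cases hzx : pvBf z x = true
        · have := pvBf_trans _ _ _ hzx hxy
          exact absurd (hy z hz) (by simp [this])
        · simpa using hzx
    · rw [if_neg hxy]
      refine List.Pairwise.cons ?_ (ih hys)
      intro z hz
      rcases (PySem.List.insertBy_mem_iff _ _ _ _).mp hz with rfl | hz
      · simpa using hxy
      · exact hy z hz

theorem foldl_insertBy_pairwise (xs acc : List (Int × Int))
    (h : acc.Pairwise (fun a b => pvBf b a = false)) :
    (xs.foldl (fun acc x => PySem.List.insertBy pvBf x acc) acc).Pairwise
      (fun a b => pvBf b a = false) := by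
  induction xs generalizing acc with
  | nil => exact h
  | cons x xs ih => exact ih _ (insertBy_pairwise x acc h)

theorem pvFloordiv_two (i : Int) : PySem.Int.floordiv i 2 = i / 2 := by
  show i.fdiv 2 = i / 2
  rw [Int.fdiv_eq_ediv]; omega

theorem pvMod_two (i : Int) : PySem.Int.mod i 2 = i % 2 := by
  show i.fmod 2 = i % 2
  rw [Int.fmod_eq_emod]; omega

-- the step of A's second loop, on the sorted pairs
def pvStep (value : List Int) (p : Int × Int) : List Int :=
  if PySem.List.pyGetD value (PySem.Int.floordiv p.2 2) 0 ≠ -1 then value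
  else PySem.List.pySetD value (PySem.Int.floordiv p.2 2) (PySem.Int.mod p.2 2)

theorem fold_char (n : Nat) (ps : List (Int × Int)) (hps : ∀ p ∈ ps, 0 ≤ p.2)
    (acc : List Int) (hlen : acc.length = n) :
    (ps.foldl pvStep acc).length = n ∧
    ∀ v : Nat, v < n →
      (ps.foldl pvStep acc).getD v 0 =
        (if acc.getD v 0 ≠ -1 then acc.getD v 0
         else match ps.find? (fun p => PySem.Int.floordiv p.2 2 == (v : Int)) with
              | some p => PySem.Int.mod p.2 2
              | none => -1) := by
  induction ps generalizing acc with
  | nil =>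
    refine ⟨hlen, fun v hv => ?_⟩
    simp only [List.foldl_nil, List.find?_nil]
    split <;> simp_all
  | cons p ps ih =>
    have hp2 : 0 ≤ p.2 := hps p List.mem_cons_self
    have hps' : ∀ q ∈ ps, 0 ≤ q.2 := fun q hq => hps q (List.mem_cons_of_mem _ hq)
    have hm : PySem.Int.floordiv p.2 2 = (((p.2 / 2).toNat : Nat) : Int) := by
      rw [pvFloordiv_two]; omega
    set m : Nat := (p.2 / 2).toNat with hmdef
    have hstep : pvStep acc p = if acc.getD m 0 ≠ -1 then acc
        else acc.set m (PySem.Int.mod p.2 2) := by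
      simp only [pvStep, hm, PySem.List.pyGetD_natCast, PySem.List.pySetD_natCast]
    have hne' : PySem.Int.mod p.2 2 ≠ -1 := by rw [pvMod_two]; omega
    simp only [List.foldl_cons]
    by_cases hd : acc.getD m 0 = -1
    · have hstep' : pvStep acc p = acc.set m (PySem.Int.mod p.2 2) := by
        rw [hstep, if_neg (not_not_intro hd)]
      have hlen' : (acc.set m (PySem.Int.mod p.2 2)).length = n := by simp [hlen]
      obtain ⟨hL, hV⟩ := ih hps' _ hlen'
      rw [hstep']
      refine ⟨hL, fun v hv => ?_⟩
      rw [hV v hv]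
      by_cases hmv : m = v
      · subst hmv
        have hin : m < acc.length := by omega
        have hget : (acc.set m (PySem.Int.mod p.2 2)).getD m 0 = PySem.Int.mod p.2 2 := by
          simp [List.getD_eq_getElem?_getD, hin]
        rw [hget, if_pos hne', if_neg (not_not_intro hd),
          List.find?_cons_of_pos (by simp; omega)]
      · have hget : (acc.set m (PySem.Int.mod p.2 2)).getD v 0 = acc.getD v 0 := by
          simp [List.getD_eq_getElem?_getD, hmv]
        rw [hget, List.find?_cons_of_neg (by simp; omega)]
    · have hstep' : pvStep acc p = acc := by rw [hstep, if_pos hd]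
      obtain ⟨hL, hV⟩ := ih hps' _ hlen
      rw [hstep']
      refine ⟨hL, fun v hv => ?_⟩
      rw [hV v hv]
      by_cases hmv : m = v
      · subst hmv
        rw [if_pos hd, if_pos hd]
      · rw [List.find?_cons_of_neg (by simp; omega)]

theorem find_two (order : List (Int × Int))
    (hpair : order.Pairwise (fun a b => pvBf b a = false))
    (pred : Int × Int → Bool) (win lose : Int × Int)
    (hwinmem : win ∈ order) (hpredwin : pred win = true)
    (honly : ∀ p ∈ order, pred p = true → p = win ∨ p = lose)
    (hbf : pvBf win lose = true) (hne : win ≠ lose) :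
    order.find? pred = some win := by
  cases hfind : order.find? pred with
  | none => exact absurd hpredwin (by simpa using List.find?_eq_none.mp hfind win hwinmem)
  | some x =>
    obtain ⟨hpx, as, bs, heq, hfail⟩ := List.find?_eq_some_iff_append.mp hfind
    have hxmem : x ∈ order := by rw [heq]; simp
    rcases honly x hxmem hpx with rfl | rfl
    · rfl
    · exfalso
      have hwin_in : win ∈ as ++ x :: bs := heq ▸ hwinmem
      have hwin_bs : win ∈ bs := by
        rcases List.mem_append.mp hwin_in with h | h
        · exact absurd hpredwin (by simpa using hfail win h)
        · rcases List.mem_cons.mp h with h | h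
          · exact absurd h hne
          · exact h
      have hR : pvBf win x = false := by
        have hp2 := hpair
        rw [heq] at hp2
        exact (List.pairwise_cons.mp (List.pairwise_append.mp hp2).2.1).1 win hwin_bs
      rw [hbf] at hR
      exact Bool.noConfusion hR

theorem order_find (label : List Int) (n : Nat)
    (order : List (Int × Int))
    (hperm : order.Perm ((PySem.List.pyRange 0 (2 * (n : Int))).map
      (fun i => (-(PySem.List.pyGetD label i 0), i))))
    (hpair : order.Pairwise (fun a b => pvBf b a = false))
    (v : Nat) (hv : v < n) :
    order.find? (fun p => PySem.Int.floordiv p.2 2 == (v : Int)) =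
      some (if PySem.List.pyGetD label (2 * (v : Int)) 0 < PySem.List.pyGetD label (2 * (v : Int) + 1) 0
            then (-(PySem.List.pyGetD label (2 * (v : Int) + 1) 0), 2 * (v : Int) + 1)
            else (-(PySem.List.pyGetD label (2 * (v : Int)) 0), 2 * (v : Int))) := by
  have hvn : (v : Int) < (n : Int) := by exact_mod_cast hv
  have hmem : ∀ i : Int, 0 ≤ i → i < 2 * (n : Int) →
      (-(PySem.List.pyGetD label i 0), i) ∈ ((PySem.List.pyRange 0 (2 * (n : Int))).map
        (fun i => (-(PySem.List.pyGetD label i 0), i))) := by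
    intro i h0 h2
    exact List.mem_map.mpr ⟨i, (PySem.List.mem_pyRange_one).mpr ⟨h0, h2⟩, rfl⟩
  have hshape : ∀ p ∈ order, ∃ i : Int, 0 ≤ i ∧ i < 2 * (n : Int) ∧
      p = (-(PySem.List.pyGetD label i 0), i) := by
    intro p hp
    obtain ⟨i, hi, rfl⟩ := List.mem_map.mp (hperm.mem_iff.mp hp)
    obtain ⟨h0, h2⟩ := (PySem.List.mem_pyRange_one).mp hi
    exact ⟨i, h0, h2, rfl⟩
  have hpvmem : (-(PySem.List.pyGetD label (2 * (v : Int)) 0), 2 * (v : Int)) ∈ order :=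
    hperm.mem_iff.mpr (hmem _ (by omega) (by omega))
  have hqvmem : (-(PySem.List.pyGetD label (2 * (v : Int) + 1) 0), 2 * (v : Int) + 1) ∈ order :=
    hperm.mem_iff.mpr (hmem _ (by omega) (by omega))
  have honly : ∀ p ∈ order, (PySem.Int.floordiv p.2 2 == (v : Int)) = true →
      p = (-(PySem.List.pyGetD label (2 * (v : Int)) 0), 2 * (v : Int)) ∨
      p = (-(PySem.List.pyGetD label (2 * (v : Int) + 1) 0), 2 * (v : Int) + 1) := by
    intro p hp hpp
    obtain ⟨i, h0, h2, rfl⟩ := hshape p hp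
    simp only [beq_iff_eq, pvFloordiv_two] at hpp
    have : i = 2 * (v : Int) ∨ i = 2 * (v : Int) + 1 := by omega
    rcases this with rfl | rfl
    · exact Or.inl rfl
    · exact Or.inr rfl
  by_cases hAB : PySem.List.pyGetD label (2 * (v : Int)) 0 <
      PySem.List.pyGetD label (2 * (v : Int) + 1) 0
  · rw [if_pos hAB]
    refine find_two order hpair _ _ _ hqvmem (by simp; try omega)
      (fun p hp hpp => (honly p hp hpp).symm) (by simp [pvBf]; try omega) (by simp [Prod.ext_iff]; try omega)
  · rw [if_neg hAB]
    refine find_two order hpair _ _ _ hpvmem (by simp; try omega)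
      honly (by simp [pvBf]; try omega) (by simp [Prod.ext_iff]; try omega)

theorem main_eq (label : List Int) : solve2SAT label = solve2SAT_alt label := by
  have hA : solve2SAT label =
      (if ((List.range (label.length / 2)).any fun k =>
            PySem.List.pyGetD label (2 * (k : Int)) 0 ==
              PySem.List.pyGetD label (2 * (k : Int) + 1) 0) then
        none
      else
        some ((PySem.List.pyRange 0 (2 * ((label.length / 2 : Nat) : Int))).foldl
          (fun value i => pvStep value (PySem.List.pyGetD
            (PySem.List.sorted2
              ((PySem.List.pyRange 0 (2 * ((label.length / 2 : Nat) : Int))).map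
                (fun i => (-(PySem.List.pyGetD label i 0), i)))
              Prod.fst Prod.snd) i (0, 0)))
          (List.replicate (label.length / 2) (-1)))) := rfl
  rw [hA]
  unfold solve2SAT_alt
  rw [altGo_eq]
  simp only [List.nil_append]
  set n := label.length / 2 with hn
  by_cases hc : ((List.range n).any fun k =>
      PySem.List.pyGetD label (2 * (k : Int)) 0 ==
        PySem.List.pyGetD label (2 * (k : Int) + 1) 0) = true
  · rw [if_pos hc, if_pos hc]
  · rw [if_neg hc, if_neg hc]
    set L := (PySem.List.pyRange 0 (2 * (n : Int))).map
      (fun i => (-(PySem.List.pyGetD label i 0), i)) with hL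
    set order := PySem.List.sorted2 L Prod.fst Prod.snd with horder
    have hperm : order.Perm L := PySem.List.sorted2_perm L Prod.fst Prod.snd false
    have hLlen : L.length = 2 * n := by
      simp [hL, PySem.List.length_pyRange_one]
      omega
    have holen : order.length = 2 * n := hperm.length_eq.trans hLlen
    have hpair : order.Pairwise (fun a b => pvBf b a = false) := by
      have hrfl : order = L.foldl (fun acc x => PySem.List.insertBy pvBf x acc) [] := rfl
      rw [hrfl]
      exact foldl_insertBy_pairwise L [] List.Pairwise.nil
    have hfold : (PySem.List.pyRange 0 (2 * (n : Int))).foldl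
        (fun value i => pvStep value (PySem.List.pyGetD order i (0, 0)))
        (List.replicate n (-1)) = order.foldl pvStep (List.replicate n (-1)) := by
      have h2n : (2 * (n : Int)) = (order.length : Int) := by rw [holen]; push_cast; ring
      rw [h2n]
      exact PySem.List.foldl_pyRange_zero_pyGetD' order (0, 0) pvStep _
    rw [hfold]
    have hps : ∀ p ∈ order, 0 ≤ p.2 := by
      intro p hp
      obtain ⟨i, hi, rfl⟩ := List.mem_map.mp (hperm.mem_iff.mp hp)
      exact ((PySem.List.mem_pyRange_one).mp hi).1
    obtain ⟨hlen', hval⟩ := fold_char n order hps (List.replicate n (-1)) (by simp)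
    refine congrArg some (List.ext_getElem (by simp [hlen']) ?_)
    intro v h1 h2
    have hvn : v < n := by simpa [hlen'] using h1
    have hchar := hval v hvn
    rw [order_find label n order hperm hpair v hvn] at hchar
    have hrep : (List.replicate n (-1 : Int)).getD v 0 = -1 := by
      simp [List.getD_eq_getElem?_getD, hvn]
    rw [hrep] at hchar
    simp only [ne_eq, not_true_eq_false, if_false] at hchar
    rw [← List.getD_eq_getElem (order.foldl pvStep (List.replicate n (-1))) 0 h1, hchar]
    by_cases hAB : PySem.List.pyGetD label (2 * (v : Int)) 0 <
        PySem.List.pyGetD label (2 * (v : Int) + 1) 0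
    · simp only [if_pos hAB, List.getElem_map, List.getElem_range]
      rw [pvMod_two]
      omega
    · simp only [if_neg hAB, List.getElem_map, List.getElem_range]
      rw [pvMod_two]
      omega

-- ===== VERDICT (by name: the statement is the Claim_ definition above) =====
theorem solve2SAT_spec : Claim_equal_solve2SAT := by
  intro label _
  unfold Spec_solve2SAT
  exact main_eq label
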